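-- pv_equiv track=rewrite | github.com/jesse-grabowski/graduation-research-embedding | src/spellcheck.py | generate_substitution_variants
-- ===== SOURCE A (Python) =====
-- from typing import Iterable, List, Tuple, Optional
-- from collections import deque
--
-- def generate_substitution_variants(
--     word: str,
--     rules: List[Tuple[str, str]],
--     max_subs: int = 2
-- ) -> Iterable[str]:
--     """Generate variants with up to max_subs substitutions using BFS."""
--     visited = {word}
--     q = deque([(word, 0)])
--     visited_add = visited.add
--     q_append = q.append
--     q_popleft = q.popleft
--
--     while q:
--         current, depth = q_popleft()
--         if depth >= max_subs:
--             continue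
--
--         for src, dst in rules:
--             start = 0
--             find = current.find
--             src_len = len(src)
--             while True:
--                 idx = find(src, start)
--                 if idx == -1:
--                     break
--
--                 cand = current[:idx] + dst + current[idx + src_len:]
--                 start = idx + 1
--
--                 if cand in visited:
--                     continue
--                 visited_add(cand)
--
--                 yield cand
--                 q_append((cand, depth + 1))
-- ===== SOURCE B (Python) =====
-- def generate_substitution_variants(word, rules, max_subs=2):
--     """Closure iteration: repeatedly expand the whole discovered list and
--     re-dedup it in first-occurrence order; no queue, no frontier, no depth tags."""
--     words = [word]
--     for _ in range(max_subs):
--         step = list(words)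
--         for w in words:
--             for src, dst in rules:
--                 m = len(src)
--                 for i in range(len(w) + 1):
--                     if w[i:i + m] == src:
--                         step.append(w[:i] + dst + w[i + m:])
--         new_words = list(dict.fromkeys(step))
--         if len(new_words) == len(words):
--             break
--         words = new_words
--     yield from words[1:]
-- ===== Notes on version B (the rewrite author's own statement) =====
-- stated objective: alternative
-- what changed: Replaces A's lazy BFS (deque of depth-tagged words, incremental seen-set, per-word find()-jump scan) by an eager whole-list closure iteration: up to max_subs times it expands every discovered word via a positional slice-compare scan, appends all candidates, re-deduplicates the entire list with dict.fromkeys (first occurrence), and stops at a fixed point; the result is the final list minus the seed word, which equals A's yields in order.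
import Mathlib
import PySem

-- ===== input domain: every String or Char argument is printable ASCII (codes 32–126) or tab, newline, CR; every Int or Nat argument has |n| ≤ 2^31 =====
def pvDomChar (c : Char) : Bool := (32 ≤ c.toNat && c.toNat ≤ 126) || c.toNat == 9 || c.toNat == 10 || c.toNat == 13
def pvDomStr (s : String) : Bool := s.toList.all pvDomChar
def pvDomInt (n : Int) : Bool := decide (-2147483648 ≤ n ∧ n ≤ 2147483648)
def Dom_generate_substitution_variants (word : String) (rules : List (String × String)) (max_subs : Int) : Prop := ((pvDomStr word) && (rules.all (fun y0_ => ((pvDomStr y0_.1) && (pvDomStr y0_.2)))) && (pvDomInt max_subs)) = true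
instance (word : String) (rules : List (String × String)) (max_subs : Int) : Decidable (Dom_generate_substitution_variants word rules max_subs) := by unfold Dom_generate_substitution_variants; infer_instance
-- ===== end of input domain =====

-- B replaces A's BFS (deque of depth-tagged words, per-word find()-scan, incremental seen-set)
-- by a whole-list closure iteration: up to max_subs times it expands EVERY discovered word,
-- appends all candidates, and re-deduplicates the whole list in first-occurrence order
-- (dict.fromkeys), stopping at a fixed point; objective: alternative (same output, same order).

-- ===== PORT A =====
-- A works on strings; the port works on their character lists (PySem.Chars is the exact model).

abbrev VS := PySem.Set (List Char)

-- termination helper for the inner `while True` find loop: a find from past the end returns -1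
theorem pvFindFrom_le (s sub : List Char) (k : Nat)
    (h : PySem.Chars.findFrom s sub (k : Int) none ≠ -1) : k ≤ s.length := by
  by_contra hk
  apply h
  simp only [PySem.Chars.findFrom]
  have : (s.length : Int) < (k : Int) := by exact_mod_cast Nat.lt_of_not_le hk
  simp
  omega

-- A's inner `while True` loop over `current.find(src, start)`: yields go to st.2, visited is st.1
def aScan (current src dst : List Char) (start : Nat) (st : VS × List (List Char)) :
    VS × List (List Char) :=
  let idx := PySem.Chars.findFrom current src (start : Int) none
  if hidx : idx = -1 then st
  else
    let i := idx.toNat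
    let cand := PySem.List.slice current none (some (i : Int)) ++ dst ++
      PySem.List.slice current (some ((i : Int) + (src.length : Int))) none
    if PySem.Set.contains st.1 cand then
      aScan current src dst (i + 1) st
    else
      aScan current src dst (i + 1) (PySem.Set.add st.1 cand, st.2 ++ [cand])
termination_by current.length + 1 - start
decreasing_by
  all_goals
    have hle : start ≤ current.length := pvFindFrom_le current src start hidx
    have hspec := (PySem.Chars.findFrom_natCast_spec current src start hle hidx).1
    omega

-- A's `for src, dst in rules` body for one dequeued word
def aExpand (rules : List (List Char × List Char)) (current : List Char) (v : VS) :
    VS × List (List Char) :=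
  rules.foldl (fun st r => aScan current r.1 r.2 0 st) (v, [])

def qRank (max_subs : Int) (p : List Char × Int) : Nat := (max_subs - p.2).toNat

-- A's `while q` loop over the deque of (word, depth) pairs
def aLoop (rules : List (List Char × List Char)) (max_subs : Int)
    (q : List (List Char × Int)) (v : VS) (out : List (List Char)) : List (List Char) :=
  match q with
  | [] => out
  | (current, depth) :: q' =>
    if max_subs ≤ depth then aLoop rules max_subs q' v out
    else
      let r := aExpand rules current v
      aLoop rules max_subs (q' ++ r.2.map (fun c => (c, depth + 1))) r.1 (out ++ r.2)
termination_by (↑(q.map (qRank max_subs)) : Multiset Nat)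
decreasing_by
  · refine ⟨↑(q'.map (qRank max_subs)), 0, {qRank max_subs (current, depth)}, by simp, by simp,
      ?_, by simp⟩
    rw [List.map_cons, ← Multiset.cons_coe, ← Multiset.singleton_add, add_comm]
  · refine ⟨↑(q'.map (qRank max_subs)),
      ↑(((aExpand rules current v).2.map (fun c => (c, depth + 1))).map (qRank max_subs)),
      {qRank max_subs (current, depth)}, by simp, by simp, ?_, ?_⟩
    · rw [List.map_cons, ← Multiset.cons_coe, ← Multiset.singleton_add, add_comm]
    · intro y hy
      refine ⟨qRank max_subs (current, depth), by simp, ?_⟩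
      simp only [Multiset.mem_coe, List.map_map, List.mem_map, Function.comp] at hy
      obtain ⟨c, _, rfl⟩ := hy
      simp only [qRank]
      omega

def generate_substitution_variants (word : String) (rules : List (String × String)) (max_subs : Int) : List String :=
  (aLoop (rules.map (fun r => (r.1.toList, r.2.toList))) max_subs
      [(word.toList, 0)] (PySem.Set.add PySem.Set.empty word.toList) []).map String.ofList

-- ===== PORT B =====
-- B's inner `for src, dst in rules: for i in range(len(w)+1): if w[i:i+m]==src: step.append(...)`
def bAppendCands (rules : List (List Char × List Char)) (w : List Char)
    (step : List (List Char)) : List (List Char) :=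
  rules.foldl (fun step r =>
    (PySem.List.pyRange 0 ((w.length : Int) + 1) 1).foldl (fun step i =>
      if PySem.List.slice w (some i) (some (i + (r.1.length : Int))) = r.1 then
        step ++ [PySem.List.slice w none (some i) ++ r.2 ++
          PySem.List.slice w (some (i + (r.1.length : Int))) none]
      else step) step) step

-- B's `for _ in range(max_subs)` loop with the fixed-point break
def bLoop (rules : List (List Char × List Char)) : Nat → List (List Char) → List (List Char)
  | 0, words => words
  | n + 1, words =>
    let step := words.foldl (fun st w => bAppendCands rules w st) words
    let new_words := PySem.List.dedup step
    if new_words.length = words.length then words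
    else bLoop rules n new_words

def generate_substitution_variants_alt (word : String) (rules : List (String × String)) (max_subs : Int) : List String :=
  (PySem.List.slice
      (bLoop (rules.map (fun r => (r.1.toList, r.2.toList))) max_subs.toNat [word.toList])
      (some 1) none).map String.ofList

-- ===== PRECONDITION & SPEC =====
def Spec_generate_substitution_variants (word : String) (rules : List (String × String)) (max_subs : Int) (out : List String) : Prop := out = generate_substitution_variants_alt word rules max_subs
instance (word : String) (rules : List (String × String)) (max_subs : Int) (out : List String) : Decidable (Spec_generate_substitution_variants word rules max_subs out) := by unfold Spec_generate_substitution_variants; infer_instance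

-- ===== CLAIM (what is proved, stated in full; the proofs are below) =====
def Claim_equal_generate_substitution_variants : Prop := ∀ (word : String) (rules : List (String × String)) (max_subs : Int), Dom_generate_substitution_variants word rules max_subs → Spec_generate_substitution_variants word rules max_subs (generate_substitution_variants word rules max_subs)

-- ===== LEMMAS AND PROOFS =====

-- the step function of the positional slice-compare loop (proof-side view of A's scan)
def bStep (current src dst : List Char) (st : VS × List (List Char) × List (List Char))
    (i : Int) : VS × List (List Char) × List (List Char) :=
  if PySem.List.slice current (some i) (some (i + (src.length : Int))) = src then
    let cand := PySem.List.slice current none (some i) ++ dst ++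
      PySem.List.slice current (some (i + (src.length : Int))) none
    if PySem.Set.contains st.1 cand then st
    else (PySem.Set.add st.1 cand, st.2.1 ++ [cand], st.2.2 ++ [cand])
  else st

-- find from past the end of the string is -1
theorem pvFindFrom_gt (s sub : List Char) (k : Nat) (h : s.length < k) :
    PySem.Chars.findFrom s sub (k : Int) none = -1 := by
  by_contra hne
  exact absurd (pvFindFrom_le s sub k hne) (by omega)

-- a prefix of a later drop is an infix of an earlier drop
theorem pvPrefixInfix (src cur : List Char) (k j : Nat) (hkj : k ≤ j)
    (h : src <+: cur.drop j) : src <:+: cur.drop k := by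
  have hdj : cur.drop j = (cur.drop k).drop (j - k) := by
    rw [List.drop_drop]; congr 1; omega
  rw [hdj] at h
  exact h.isInfix.trans (List.drop_suffix _ _).isInfix

-- when find fails there is no later match position
theorem pvNoMatch (cur src : List Char) (k : Nat) (hk : k ≤ cur.length)
    (hf : PySem.Chars.findFrom cur src (k : Int) none = -1) :
    ∀ j : Nat, k ≤ j → ¬ src <+: cur.drop j := by
  intro j hkj hpre
  exact ((PySem.Chars.findFrom_natCast_eq_neg_one_iff cur src k hk).mp hf)
    (pvPrefixInfix src cur k j hkj hpre)

-- find returns the first match position at or after the start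
theorem pvFindFrom_eq_of (cur src : List Char) (k i : Nat) (hk : k ≤ cur.length)
    (hki : k ≤ i) (hpre : src <+: cur.drop i)
    (hmin : ∀ j : Nat, k ≤ j → j < i → ¬ src <+: cur.drop j) :
    PySem.Chars.findFrom cur src (k : Int) none = (i : Int) := by
  have hne : PySem.Chars.findFrom cur src (k : Int) none ≠ -1 := by
    rw [Ne, PySem.Chars.findFrom_natCast_eq_neg_one_iff cur src k hk]
    exact not_not_intro (pvPrefixInfix src cur k i hki hpre)
  obtain ⟨h1, h2, h3⟩ := PySem.Chars.findFrom_natCast_spec cur src k hk hne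
  have hFnn : (0 : Int) ≤ PySem.Chars.findFrom cur src (k : Int) none :=
    le_trans (by exact_mod_cast Nat.zero_le k) h1
  have hkF : k ≤ (PySem.Chars.findFrom cur src (k : Int) none).toNat := by omega
  rcases lt_trichotomy (PySem.Chars.findFrom cur src (k : Int) none).toNat i with hlt | heq | hgt
  · exact absurd h2 (hmin _ hkF hlt)
  · omega
  · exact absurd hpre (h3 i hki hgt)

-- the positional slice-compare test at a Nat position is exactly "src is a prefix of current.drop n"
theorem bTest_iff (current src : List Char) (n : Nat) :
    (PySem.List.slice current (some (n : Int)) (some ((n : Int) + (src.length : Int))) = src)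
      ↔ src <+: current.drop n := by
  rw [PySem.List.slice_natCast_add, List.prefix_iff_eq_take]
  exact eq_comm

-- the positional loop from position k onward (proof-side view)
def posFold (current src dst : List Char) (k : Nat)
    (st : VS × List (List Char) × List (List Char)) : VS × List (List Char) × List (List Char) :=
  (PySem.List.pyRange (k : Int) ((current.length : Int) + 1) 1).foldl (bStep current src dst) st

theorem posFold_nil (current src dst : List Char) (k : Nat) (hk : current.length < k)
    (st : VS × List (List Char) × List (List Char)) : posFold current src dst k st = st := by
  unfold posFold
  rw [PySem.List.pyRange_one_eq_nil (by exact_mod_cast hk)]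
  rfl

theorem posFold_cons (current src dst : List Char) (k : Nat) (hk : k ≤ current.length)
    (st : VS × List (List Char) × List (List Char)) : posFold current src dst k st
      = posFold current src dst (k + 1) (bStep current src dst st (k : Int)) := by
  unfold posFold
  rw [PySem.List.pyRange_one_cons (by exact_mod_cast Nat.lt_succ_of_le hk)]
  rw [List.foldl_cons]
  norm_num

-- aScan ignores what is already in the accumulated yield list
theorem aScan_acc (current src dst : List Char) : ∀ m (start : Nat),
    current.length + 1 - start ≤ m → ∀ (v : VS) (acc : List (List Char)),
    aScan current src dst start (v, acc)
      = ((aScan current src dst start (v, [])).1, acc ++ (aScan current src dst start (v, [])).2) := by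
  intro m
  induction m with
  | zero =>
    intro start hle v acc
    have hf : PySem.Chars.findFrom current src (start : Int) none = -1 :=
      pvFindFrom_gt current src start (by omega)
    rw [aScan, aScan]
    simp [hf]
  | succ m ih =>
    intro start hle v acc
    by_cases hf : PySem.Chars.findFrom current src (start : Int) none = -1
    · rw [aScan, aScan]; simp [hf]
    · have hstart := pvFindFrom_le current src start hf
      have hspec := (PySem.Chars.findFrom_natCast_spec current src start hstart hf).1
      have hm : current.length + 1 -
          ((PySem.Chars.findFrom current src (start : Int) none).toNat + 1) ≤ m := by omega
      rw [aScan, aScan]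
      rw [dif_neg hf, dif_neg hf]
      by_cases hc : PySem.Set.contains v
          (PySem.List.slice current none
              (some ((PySem.Chars.findFrom current src (start : Int) none).toNat : Int)) ++ dst ++
            PySem.List.slice current
              (some (((PySem.Chars.findFrom current src (start : Int) none).toNat : Int) +
                (src.length : Int))) none) = true
      · simp only [hc, if_true]
        exact ih _ hm v acc
      · simp only [hc, if_false, Bool.false_eq_true]
        rw [ih _ hm _ (acc ++ [_])]
        simp only [List.nil_append]
        rw [ih _ hm _ ([_])]
        simp

-- the positional scan computes A's find-jump scan (with yields going to both lists)
theorem posFold_eq_aScan (current src dst : List Char) : ∀ m (k : Nat),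
    current.length + 1 - k ≤ m → ∀ (v : VS) (nx o : List (List Char)),
    posFold current src dst k (v, nx, o)
      = ((aScan current src dst k (v, [])).1,
         nx ++ (aScan current src dst k (v, [])).2,
         o ++ (aScan current src dst k (v, [])).2) := by
  intro m
  induction m with
  | zero =>
    intro k hle v nx o
    have hk : current.length < k := by omega
    have hf : PySem.Chars.findFrom current src (k : Int) none = -1 :=
      pvFindFrom_gt current src k hk
    rw [posFold_nil current src dst k hk, aScan]
    simp [hf]
  | succ m ih =>
    intro k hle v nx o
    by_cases hk : k ≤ current.length
    case neg =>
      have hk' : current.length < k := by omega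
      have hf : PySem.Chars.findFrom current src (k : Int) none = -1 :=
        pvFindFrom_gt current src k hk'
      rw [posFold_nil current src dst k hk', aScan]
      simp [hf]
    case pos =>
    by_cases hpre : src <+: current.drop k
    · -- match at position k: find returns k; both sides handle cand and move to k+1
      have hfk : PySem.Chars.findFrom current src (k : Int) none = (k : Int) :=
        pvFindFrom_eq_of current src k k hk le_rfl hpre (by intro j h1 h2; omega)
      have hne : PySem.Chars.findFrom current src (k : Int) none ≠ -1 := by
        rw [hfk]; omega
      have hbt : (PySem.List.slice current (some (k : Int))
          (some ((k : Int) + (src.length : Int))) = src) := (bTest_iff current src k).mpr hpre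
      have hA : aScan current src dst k (v, []) =
          (if PySem.Set.contains v (PySem.List.slice current none (some (k : Int)) ++ dst ++
              PySem.List.slice current (some ((k : Int) + (src.length : Int))) none) then
            aScan current src dst (k + 1) (v, [])
          else
            aScan current src dst (k + 1)
              (PySem.Set.add v (PySem.List.slice current none (some (k : Int)) ++ dst ++
                PySem.List.slice current (some ((k : Int) + (src.length : Int))) none),
               [PySem.List.slice current none (some (k : Int)) ++ dst ++
                PySem.List.slice current (some ((k : Int) + (src.length : Int))) none])) := by
        rw [aScan]
        rw [dif_neg hne]
        simp only [hfk, Int.toNat_natCast]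
        rfl
      rw [posFold_cons current src dst k hk]
      unfold bStep
      rw [if_pos hbt]
      by_cases hc : PySem.Set.contains v (PySem.List.slice current none (some (k : Int)) ++ dst ++
          PySem.List.slice current (some ((k : Int) + (src.length : Int))) none) = true
      · simp only [hc, if_true]
        rw [ih (k + 1) (by omega) v nx o]
        rw [hA]
        simp only [hc, if_true]
      · simp only [hc, if_false, Bool.false_eq_true]
        rw [ih (k + 1) (by omega) _ _ _]
        rw [hA]
        simp only [hc, if_false, Bool.false_eq_true]
        rw [aScan_acc current src dst (current.length + 1) (k + 1) (by omega) _ [_]]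
        simp
    · -- no match at position k: the positional loop skips it, and A's find skips it too
      have hstep : bStep current src dst (v, nx, o) (k : Int) = (v, nx, o) := by
        unfold bStep
        rw [if_neg]
        rw [bTest_iff]; exact hpre
      rw [posFold_cons current src dst k hk, hstep]
      rw [ih (k + 1) (by omega) v nx o]
      by_cases hf : PySem.Chars.findFrom current src (k : Int) none = -1
      · have hf' : PySem.Chars.findFrom current src ((k + 1 : Nat) : Int) none = -1 := by
          by_cases hk1 : k + 1 ≤ current.length
          · rw [PySem.Chars.findFrom_natCast_eq_neg_one_iff current src (k + 1) hk1]
            intro hinf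
            have hin : PySem.Chars.isIn src (current.drop (k + 1)) = true :=
              (PySem.Chars.isIn_iff_infix _ _).mpr hinf
            obtain ⟨j, hj⟩ := (PySem.Chars.exists_prefix_drop_iff_isIn _ _).mpr hin
            rw [List.drop_drop] at hj
            exact pvNoMatch current src k hk hf (k + 1 + j) (by omega) hj
          · exact pvFindFrom_gt current src (k + 1) (by omega)
        have hA : aScan current src dst k (v, []) = aScan current src dst (k + 1) (v, []) := by
          rw [aScan]
          conv_rhs => rw [aScan]
          rw [dif_pos hf, dif_pos hf']
        rw [hA]
      · -- find at k and find at k+1 land on the same later position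
        have hstart := pvFindFrom_le current src k hf
        obtain ⟨h1, h2, h3⟩ := PySem.Chars.findFrom_natCast_spec current src k hk hf
        have hFnn : (0 : Int) ≤ PySem.Chars.findFrom current src (k : Int) none :=
          le_trans (by exact_mod_cast Nat.zero_le k) h1
        have hne : (PySem.Chars.findFrom current src (k : Int) none).toNat ≠ k := by
          intro he; rw [← he] at hpre; exact hpre h2
        have hkF : k < (PySem.Chars.findFrom current src (k : Int) none).toNat := by omega
        have hFlen : (PySem.Chars.findFrom current src (k : Int) none).toNat ≤ current.length := by
          by_cases hsrc : src = []
          · exact absurd (hsrc ▸ List.nil_prefix) hpre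
          · have hl := h2.length_le
            have hsl : 0 < src.length := List.length_pos_of_ne_nil hsrc
            rw [List.length_drop] at hl
            omega
        have hf1 : PySem.Chars.findFrom current src ((k + 1 : Nat) : Int) none =
            ((PySem.Chars.findFrom current src (k : Int) none).toNat : Int) := by
          apply pvFindFrom_eq_of current src (k + 1) _ (by omega) (by omega) h2
          intro j hj1 hj2
          exact h3 j (by omega) hj2
        have hfk : PySem.Chars.findFrom current src (k : Int) none =
            ((PySem.Chars.findFrom current src (k : Int) none).toNat : Int) := by omega
        have hA : aScan current src dst k (v, []) = aScan current src dst (k + 1) (v, []) := by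
          rw [aScan]
          conv_rhs => rw [aScan]
          rw [hf1, ← hfk]
        rw [hA]

-- aExpand ignores what is already in the accumulated yield list
theorem aExpand_acc (rules : List (List Char × List Char)) (current : List Char) :
    ∀ (v : VS) (acc : List (List Char)),
    rules.foldl (fun st r => aScan current r.1 r.2 0 st) (v, acc)
      = ((aExpand rules current v).1, acc ++ (aExpand rules current v).2) := by
  induction rules with
  | nil => intro v acc; simp [aExpand]
  | cons r rs ih =>
    intro v acc
    simp only [aExpand, List.foldl_cons]
    rw [aScan_acc current r.1 r.2 (current.length + 1) 0 (by omega) v acc]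
    rw [ih _ (acc ++ _)]
    have h2 := aScan_acc current r.1 r.2 (current.length + 1) 0 (by omega) v []
    simp only [List.nil_append] at h2
    rw [show aScan current r.1 r.2 0 (v, []) =
        ((aScan current r.1 r.2 0 (v, [])).1, [] ++ (aScan current r.1 r.2 0 (v, [])).2) from
      by simp]
    rw [ih _ ([] ++ _)]
    simp

-- proof-side level-BFS view of A: per-word body threading (visited, next, out)
def lvlExpand (rules : List (List Char × List Char)) (current : List Char)
    (st : VS × List (List Char) × List (List Char)) : VS × List (List Char) × List (List Char) :=
  rules.foldl (fun st r =>
    (PySem.List.pyRange 0 ((current.length : Int) + 1) 1).foldl (bStep current r.1 r.2) st) st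

-- the per-word level body computes A's per-word body
theorem lvlExpand_eq_aExpand (rules : List (List Char × List Char)) (current : List Char) :
    ∀ (v : VS) (nx o : List (List Char)),
    lvlExpand rules current (v, nx, o)
      = ((aExpand rules current v).1, nx ++ (aExpand rules current v).2,
         o ++ (aExpand rules current v).2) := by
  induction rules with
  | nil => intro v nx o; simp [lvlExpand, aExpand]
  | cons r rs ih =>
    intro v nx o
    show List.foldl _ ((PySem.List.pyRange 0 ((current.length : Int) + 1) 1).foldl
      (bStep current r.1 r.2) (v, nx, o)) rs = _
    have hpos : (PySem.List.pyRange 0 ((current.length : Int) + 1) 1).foldl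
        (bStep current r.1 r.2) (v, nx, o) = posFold current r.1 r.2 0 (v, nx, o) := by
      unfold posFold; norm_num
    rw [hpos, posFold_eq_aScan current r.1 r.2 (current.length + 1) 0 (by omega) v nx o]
    rw [show List.foldl _ _ rs = lvlExpand rs current _ from rfl]
    rw [ih _ _ _]
    simp only [aExpand, List.foldl_cons]
    rw [show aScan current r.1 r.2 0 (v, []) =
        ((aScan current r.1 r.2 0 (v, [])).1, [] ++ (aScan current r.1 r.2 0 (v, [])).2) from
      by simp]
    rw [aExpand_acc rs current _ ([] ++ _)]
    simp [aExpand]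

-- items at depth ≥ max_subs are drained without effect
theorem aLoop_drain (rules : List (List Char × List Char)) (max_subs : Int) :
    ∀ (q : List (List Char × Int)), (∀ p ∈ q, max_subs ≤ p.2) →
    ∀ (v : VS) (out : List (List Char)), aLoop rules max_subs q v out = out := by
  intro q
  induction q with
  | nil => intro _ v out; rw [aLoop]
  | cons p q' ih =>
    intro hq v out
    obtain ⟨c, d⟩ := p
    rw [aLoop]
    rw [if_pos (hq (c, d) List.mem_cons_self)]
    exact ih (fun p hp => hq p (List.mem_cons_of_mem _ hp)) v out

-- proof-side level-synchronised BFS (frontier per level, fuel = remaining levels)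
def bLevels (rules : List (List Char × List Char)) (fuel : Nat)
    (frontier : List (List Char)) (v : VS) (out : List (List Char)) : List (List Char) :=
  match fuel, frontier with
  | 0, _ => out
  | _ + 1, [] => out
  | n + 1, f =>
    let st := f.foldl (fun st c => lvlExpand rules c st) (v, [], out)
    bLevels rules n st.2.1 st.1 st.2.2

-- proof-side view of the level loop, mid-level: f still to process, nx already discovered
def bAux (rules : List (List Char × List Char)) (n : Nat) (f nx : List (List Char))
    (v : VS) (out : List (List Char)) : List (List Char) :=
  match f with
  | [] => bLevels rules (n - 1) nx v out
  | w :: f' =>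
    bAux rules n f' (nx ++ (aExpand rules w v).2) (aExpand rules w v).1
      (out ++ (aExpand rules w v).2)

-- bAux finishes the level exactly as the fold over the frontier does
theorem bAux_fold (rules : List (List Char × List Char)) (n : Nat) :
    ∀ (f nx : List (List Char)) (v : VS) (out : List (List Char)),
    bAux rules (n + 1) f nx v out
      = bLevels rules n ((f.foldl (fun st c => lvlExpand rules c st) (v, nx, out)).2.1)
          ((f.foldl (fun st c => lvlExpand rules c st) (v, nx, out)).1)
          ((f.foldl (fun st c => lvlExpand rules c st) (v, nx, out)).2.2) := by
  intro f
  induction f with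
  | nil => intro nx v out; simp [bAux]
  | cons w f' ih =>
    intro nx v out
    simp only [bAux, List.foldl_cons]
    rw [ih _ _ _]
    rw [lvlExpand_eq_aExpand rules w v nx out]

theorem bLevels_eq_bAux (rules : List (List Char × List Char)) (n : Nat) (hn : 1 ≤ n)
    (f : List (List Char)) (v : VS) (out : List (List Char)) :
    bLevels rules n f v out = bAux rules n f [] v out := by
  obtain ⟨m, rfl⟩ : ∃ m, n = m + 1 := ⟨n - 1, by omega⟩
  cases f with
  | nil =>
    rw [bAux]
    cases m <;> rfl
  | cons w f' =>
    rw [bAux_fold rules m (w :: f') [] v out]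
    rfl

-- A's queue is always "rest of this level, then the next level"; level-wise processing agrees
theorem aLoop_eq_bAux (rules : List (List Char × List Char)) (max_subs : Int) :
    ∀ (n : Nat), 1 ≤ n → ∀ (d : Int), d + n = max_subs →
    ∀ (f nx : List (List Char)) (v : VS) (out : List (List Char)),
    aLoop rules max_subs (f.map (fun w => (w, d)) ++ nx.map (fun w => (w, d + 1))) v out
      = bAux rules n f nx v out := by
  intro n
  induction n with
  | zero => intro h; omega
  | succ n ih =>
    intro _ d hd f
    induction f with
    | nil =>
      intro nx v out
      rw [bAux]
      simp only [List.map_nil, List.nil_append, Nat.add_sub_cancel]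
      cases n with
      | zero =>
        rw [bLevels]
        apply aLoop_drain
        intro p hp
        obtain ⟨w, _, rfl⟩ := List.mem_map.mp hp
        omega
      | succ m =>
        rw [bLevels_eq_bAux rules (m + 1) (by omega) nx v out]
        have := ih (by omega) (d + 1) (by omega) nx [] v out
        simp only [List.map_nil, List.append_nil] at this
        exact this
    | cons w f' ihf =>
      intro nx v out
      simp only [List.map_cons, List.cons_append]
      rw [aLoop]
      rw [if_neg (by omega)]
      show aLoop rules max_subs
          ((f'.map (fun w => (w, d)) ++ nx.map (fun w => (w, d + 1))) ++
            (aExpand rules w v).2.map (fun c => (c, d + 1))) (aExpand rules w v).1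
          (out ++ (aExpand rules w v).2) = bAux rules (n + 1) (w :: f') nx v out
      have hq : (f'.map (fun w => (w, d)) ++ nx.map (fun w => (w, d + 1))) ++
            (aExpand rules w v).2.map (fun c => (c, d + 1))
          = f'.map (fun w => (w, d)) ++ (nx ++ (aExpand rules w v).2).map (fun w => (w, d + 1)) := by
        rw [List.map_append, List.append_assoc]
      rw [hq]
      rw [ihf (nx ++ (aExpand rules w v).2) (aExpand rules w v).1 (out ++ (aExpand rules w v).2)]
      rfl

-- ===== new machinery: the closure-iteration side =====

-- one rule's candidate list from position k on (closed form of the positional appends)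
def pcFrom (w src dst : List Char) (k : Nat) : List (List Char) :=
  ((PySem.List.pyRange (k : Int) ((w.length : Int) + 1) 1).filter (fun i =>
      decide (PySem.List.slice w (some i) (some (i + (src.length : Int))) = src))).map
    (fun i => PySem.List.slice w none (some i) ++ dst ++
      PySem.List.slice w (some (i + (src.length : Int))) none)

-- the candidate list of one word, in rule-then-position order (closed form of B's appends)
def candsOf (rules : List (List Char × List Char)) (w : List Char) : List (List Char) :=
  rules.flatMap (fun r => pcFrom w r.1 r.2 0)

theorem pcInner (w src dst : List Char) (step : List (List Char)) :
    (PySem.List.pyRange 0 ((w.length : Int) + 1) 1).foldl (fun step i =>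
      if PySem.List.slice w (some i) (some (i + (src.length : Int))) = src then
        step ++ [PySem.List.slice w none (some i) ++ dst ++
          PySem.List.slice w (some (i + (src.length : Int))) none]
      else step) step = step ++ pcFrom w src dst 0 := by
  have hfun : (fun (step : List (List Char)) (i : Int) =>
      if PySem.List.slice w (some i) (some (i + (src.length : Int))) = src then
        step ++ [PySem.List.slice w none (some i) ++ dst ++
          PySem.List.slice w (some (i + (src.length : Int))) none]
      else step)
      = (fun step i =>
        if (fun i => decide (PySem.List.slice w (some i) (some (i + (src.length : Int))) = src)) i
            = true then
          step ++ [(fun i => PySem.List.slice w none (some i) ++ dst ++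
            PySem.List.slice w (some (i + (src.length : Int))) none) i]
        else step) := by
    funext st i
    simp
  rw [hfun, PySem.List.foldl_append_if]
  simp [pcFrom]

theorem bAppendCands_spec (rules : List (List Char × List Char)) (w : List Char)
    (step : List (List Char)) : bAppendCands rules w step = step ++ candsOf rules w := by
  unfold bAppendCands
  rw [show (fun (step : List (List Char)) (r : List Char × List Char) =>
      (PySem.List.pyRange 0 ((w.length : Int) + 1) 1).foldl (fun step i =>
        if PySem.List.slice w (some i) (some (i + (r.1.length : Int))) = r.1 then
          step ++ [PySem.List.slice w none (some i) ++ r.2 ++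
            PySem.List.slice w (some (i + (r.1.length : Int))) none]
        else step) step)
    = (fun step r => step ++ pcFrom w r.1 r.2 0) from by
      funext st r; exact pcInner w r.1 r.2 st]
  exact PySem.List.foldl_append_eq_flatMap _ rules step

-- ordered dedup against an existing set: (final set, the new elements in order)
def addNew (X : List (List Char)) (st : VS × List (List Char)) : VS × List (List Char) :=
  X.foldl (fun st c => if PySem.Set.contains st.1 c then st else (st.1 ++ [c], st.2 ++ [c])) st

theorem addNew_cons (c : List Char) (X : List (List Char)) (st : VS × List (List Char)) :
    addNew (c :: X) st
      = addNew X (if PySem.Set.contains st.1 c then st else (st.1 ++ [c], st.2 ++ [c])) := rfl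

theorem addNew_append (X Y : List (List Char)) (st : VS × List (List Char)) :
    addNew (X ++ Y) st = addNew Y (addNew X st) := by
  unfold addNew; exact List.foldl_append

theorem addNew_acc (X : List (List Char)) : ∀ (v : VS) (acc : List (List Char)),
    addNew X (v, acc) = ((addNew X (v, [])).1, acc ++ (addNew X (v, [])).2) := by
  induction X with
  | nil => intro v acc; simp [addNew]
  | cons c X ih =>
    intro v acc
    rw [addNew_cons, addNew_cons]
    by_cases hc : PySem.Set.contains v c = true
    · simp only [hc, if_true]
      exact ih v acc
    · simp only [hc, if_false, Bool.false_eq_true]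
      rw [ih (v ++ [c]) (acc ++ [c]), ih (v ++ [c]) ([] ++ [c])]
      simp

theorem addNew_pair (X : List (List Char)) (p : VS × List (List Char)) :
    addNew X p = ((addNew X (p.1, [])).1, p.2 ++ (addNew X (p.1, [])).2) := by
  obtain ⟨v, acc⟩ := p
  exact addNew_acc X v acc

theorem addNew_fst (X : List (List Char)) : ∀ (v : VS) (acc : List (List Char)),
    (addNew X (v, acc)).1 = X.foldl PySem.Set.add v := by
  induction X with
  | nil => intro v acc; simp [addNew]
  | cons c X ih =>
    intro v acc
    rw [addNew_cons, List.foldl_cons]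
    by_cases hc : PySem.Set.contains v c = true
    · simp only [hc, if_true, PySem.Set.add]
      exact ih v acc
    · simp only [hc, if_false, Bool.false_eq_true, PySem.Set.add]
      exact ih (v ++ [c]) (acc ++ [c])

theorem addNew_split (X : List (List Char)) : ∀ (v : VS) (acc : List (List Char)),
    (addNew X (v, acc)).1 = v ++ (addNew X (v, [])).2 := by
  induction X with
  | nil => intro v acc; simp [addNew]
  | cons c X ih =>
    intro v acc
    rw [addNew_cons, addNew_cons]
    by_cases hc : PySem.Set.contains v c = true
    · simp only [hc, if_true]
      exact ih v acc
    · simp only [hc, if_false, Bool.false_eq_true]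
      rw [ih (v ++ [c]) (acc ++ [c])]
      rw [addNew_acc X (v ++ [c]) ([] ++ [c])]
      simp

theorem addNew_skip (X : List (List Char)) : ∀ (st : VS × List (List Char)),
    (∀ c ∈ X, c ∈ st.1) → addNew X st = st := by
  induction X with
  | nil => intro st _; rfl
  | cons c X ih =>
    intro st h
    rw [addNew_cons]
    have hc : PySem.Set.contains st.1 c = true := by
      simp only [PySem.Set.contains, List.contains_iff_mem]
      exact h c List.mem_cons_self
    rw [if_pos hc]
    exact ih st (fun x hx => h x (List.mem_cons_of_mem _ hx))

-- a nodup list folded into a disjoint set is plain concatenation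
theorem foldl_add_nodup (l : List (List Char)) : ∀ (s : VS), (s ++ l).Nodup →
    l.foldl PySem.Set.add s = s ++ l := by
  induction l with
  | nil => intro s _; simp
  | cons a l ih =>
    intro s h
    have ha : a ∉ s := by
      have h' := h
      simp only [List.nodup_append] at h'
      exact fun hin => h'.2.2 a hin a List.mem_cons_self rfl
    rw [List.foldl_cons]
    have hadd : PySem.Set.add s a = s ++ [a] := by
      simp only [PySem.Set.add, PySem.Set.contains, List.contains_iff_mem]
      simp [ha]
    rw [hadd, ih (s ++ [a]) (by simpa using h)]
    simp

theorem foldl_add_eq_ofList (X : List (List Char)) (v : VS) (hv : v.Nodup) :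
    X.foldl PySem.Set.add v = PySem.Set.ofList (v ++ X) := by
  rw [PySem.Set.ofList_eq_foldl, List.foldl_append]
  congr 1
  have := foldl_add_nodup v ([] : VS) (by simpa using hv)
  simpa using this.symm

theorem pcFrom_nil (w src dst : List Char) (k : Nat) (hk : w.length < k) :
    pcFrom w src dst k = [] := by
  unfold pcFrom
  rw [PySem.List.pyRange_one_eq_nil (by exact_mod_cast hk)]
  rfl

theorem pcFrom_cons (w src dst : List Char) (k : Nat) (hk : k ≤ w.length) :
    pcFrom w src dst k =
      (if PySem.List.slice w (some (k : Int)) (some ((k : Int) + (src.length : Int))) = src then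
        [PySem.List.slice w none (some (k : Int)) ++ dst ++
          PySem.List.slice w (some ((k : Int) + (src.length : Int))) none]
      else [])
      ++ pcFrom w src dst (k + 1) := by
  unfold pcFrom
  rw [PySem.List.pyRange_one_cons (by exact_mod_cast Nat.lt_succ_of_le hk)]
  rw [List.filter_cons]
  by_cases h : PySem.List.slice w (some (k : Int)) (some ((k : Int) + (src.length : Int))) = src
  · simp only [h, decide_true, if_true, List.map_cons]
    push_cast
    simp
  · simp only [h, decide_false, if_false]
    push_cast
    simp

-- the positional scan equals ordered dedup of the candidate list (A's inner loop, closed)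
theorem posFold_eq_addNew (w src dst : List Char) : ∀ m (k : Nat),
    w.length + 1 - k ≤ m → ∀ (v : VS) (nx o : List (List Char)),
    posFold w src dst k (v, nx, o)
      = ((addNew (pcFrom w src dst k) (v, [])).1,
         nx ++ (addNew (pcFrom w src dst k) (v, [])).2,
         o ++ (addNew (pcFrom w src dst k) (v, [])).2) := by
  intro m
  induction m with
  | zero =>
    intro k hle v nx o
    have hk : w.length < k := by omega
    rw [posFold_nil w src dst k hk, pcFrom_nil w src dst k hk]
    simp [addNew]
  | succ m ih =>
    intro k hle v nx o
    by_cases hk : k ≤ w.length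
    case neg =>
      have hk' : w.length < k := by omega
      rw [posFold_nil w src dst k hk', pcFrom_nil w src dst k hk']
      simp [addNew]
    case pos =>
    rw [posFold_cons w src dst k hk, pcFrom_cons w src dst k hk]
    by_cases ht : PySem.List.slice w (some (k : Int))
        (some ((k : Int) + (src.length : Int))) = src
    · rw [if_pos ht]
      unfold bStep
      rw [if_pos ht]
      by_cases hc : PySem.Set.contains v (PySem.List.slice w none (some (k : Int)) ++ dst ++
          PySem.List.slice w (some ((k : Int) + (src.length : Int))) none) = true
      · simp only [hc, if_true]
        rw [ih (k + 1) (by omega) v nx o]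
        rw [List.singleton_append, addNew_cons]
        simp only [hc, if_true]
      · simp only [hc, if_false, Bool.false_eq_true]
        rw [ih (k + 1) (by omega) _ _ _]
        rw [List.singleton_append, addNew_cons]
        simp only [hc, if_false, Bool.false_eq_true]
        rw [addNew_acc _ _ ([] ++ [_])]
        have hadd : PySem.Set.add v (PySem.List.slice w none (some (k : Int)) ++ dst ++
            PySem.List.slice w (some ((k : Int) + (src.length : Int))) none)
            = v ++ [PySem.List.slice w none (some (k : Int)) ++ dst ++
              PySem.List.slice w (some ((k : Int) + (src.length : Int))) none] := by
          unfold PySem.Set.add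
          rw [if_neg]
          simpa [PySem.Set.contains, List.contains_iff_mem] using hc
        rw [hadd]
        simp
    · rw [if_neg ht]
      have hstep : bStep w src dst (v, nx, o) (k : Int) = (v, nx, o) := by
        unfold bStep
        rw [if_neg ht]
      rw [hstep, List.nil_append]
      exact ih (k + 1) (by omega) v nx o

-- A's per-rule scan is ordered dedup of that rule's candidate list
theorem aScan_eq_addNew (w src dst : List Char) (v : VS) :
    aScan w src dst 0 (v, []) = addNew (pcFrom w src dst 0) (v, []) := by
  have h := (posFold_eq_aScan w src dst (w.length + 1) 0 (by omega) v [] []).symm.trans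
    (posFold_eq_addNew w src dst (w.length + 1) 0 (by omega) v [] [])
  simp only [List.nil_append, Prod.mk.injEq] at h
  exact Prod.ext h.1 h.2.1

-- A's whole per-word body is ordered dedup of candsOf
theorem aExpand_eq_addNew (rules : List (List Char × List Char)) :
    ∀ (w : List Char) (v : VS), aExpand rules w v = addNew (candsOf rules w) (v, []) := by
  induction rules with
  | nil => intro w v; simp [aExpand, candsOf, addNew]
  | cons r rs ih =>
    intro w v
    have hcons : candsOf (r :: rs) w = pcFrom w r.1 r.2 0 ++ candsOf rs w := by
      simp [candsOf]
    rw [hcons, addNew_append, ← aScan_eq_addNew]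
    simp only [aExpand, List.foldl_cons]
    rw [show aScan w r.1 r.2 0 (v, [])
        = ((aScan w r.1 r.2 0 (v, [])).1, (aScan w r.1 r.2 0 (v, [])).2) from rfl]
    rw [aExpand_acc rs w _ _]
    rw [addNew_acc (candsOf rs w) _ _]
    rw [ih w _]

-- one whole level of the level-BFS is ordered dedup of the frontier's candidates
theorem level_fold (rules : List (List Char × List Char)) :
    ∀ (f : List (List Char)) (v : VS) (nx out : List (List Char)),
    f.foldl (fun st c => lvlExpand rules c st) (v, nx, out)
      = ((addNew (f.flatMap (candsOf rules)) (v, [])).1,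
         nx ++ (addNew (f.flatMap (candsOf rules)) (v, [])).2,
         out ++ (addNew (f.flatMap (candsOf rules)) (v, [])).2) := by
  intro f
  induction f with
  | nil => intro v nx out; simp [addNew]
  | cons c f' ih =>
    intro v nx out
    rw [List.foldl_cons, lvlExpand_eq_aExpand rules c v nx out]
    rw [ih _ _ _]
    rw [List.flatMap_cons, addNew_append]
    rw [aExpand_eq_addNew rules c v]
    rw [addNew_pair (f'.flatMap (candsOf rules)) (addNew (candsOf rules c) (v, []))]
    simp

theorem bLevels_acc (rules : List (List Char × List Char)) :
    ∀ (n : Nat) (f : List (List Char)) (v : VS) (out : List (List Char)),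
    bLevels rules n f v out = out ++ bLevels rules n f v [] := by
  intro n
  induction n with
  | zero => intro f v out; simp [bLevels]
  | succ n ih =>
    intro f v out
    cases f with
    | nil => simp [bLevels]
    | cons c f' =>
      simp only [bLevels]
      rw [level_fold rules (c :: f') v [] out, level_fold rules (c :: f') v [] []]
      simp only [List.nil_append]
      rw [ih _ _ (out ++ _), ih _ _ ((addNew ((c :: f').flatMap (candsOf rules)) (v, [])).2)]
      simp

-- the closure iteration computes the level-BFS: invariant "pre is already fully expanded"
theorem bLoop_eq_bLevels (rules : List (List Char × List Char)) :
    ∀ (n : Nat) (pre f : List (List Char)), (pre ++ f).Nodup →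
    (∀ w ∈ pre, ∀ c ∈ candsOf rules w, c ∈ pre ++ f) →
    bLoop rules n (pre ++ f) = (pre ++ f) ++ bLevels rules n f (pre ++ f) [] := by
  intro n
  induction n with
  | zero => intro pre f _ _; simp [bLoop, bLevels]
  | succ n ih =>
    intro pre f h1 h2
    have hstep : (pre ++ f).foldl (fun st w => bAppendCands rules w st) (pre ++ f)
        = (pre ++ f) ++ (pre ++ f).flatMap (candsOf rules) := by
      rw [show (fun (st : List (List Char)) w => bAppendCands rules w st)
          = (fun st w => st ++ candsOf rules w) from by
        funext st w; exact bAppendCands_spec rules w st]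
      exact PySem.List.foldl_append_eq_flatMap _ _ _
    have hskip : addNew (pre.flatMap (candsOf rules)) ((pre ++ f : VS), []) = (pre ++ f, []) := by
      apply addNew_skip
      intro c hc
      obtain ⟨w, hw, hcw⟩ := List.mem_flatMap.mp hc
      exact h2 w hw c hcw
    have hded : PySem.List.dedup ((pre ++ f) ++ (pre ++ f).flatMap (candsOf rules))
        = (pre ++ f) ++ (addNew (f.flatMap (candsOf rules)) ((pre ++ f : VS), [])).2 := by
      rw [PySem.List.dedup_eq_ofList, ← foldl_add_eq_ofList _ _ h1]
      rw [← addNew_fst _ _ []]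
      rw [List.flatMap_append, addNew_append, hskip]
      exact addNew_split _ _ []
    have hmem : ∀ x, x ∈ (pre ++ f) ++ (addNew (f.flatMap (candsOf rules)) ((pre ++ f : VS), [])).2
        ↔ x ∈ (pre ++ f) ++ (pre ++ f).flatMap (candsOf rules) := by
      intro x
      rw [← hded, PySem.List.dedup_eq_ofList]
      exact PySem.Set.mem_ofList _ x
    have hnodup : ((pre ++ f) ++
        (addNew (f.flatMap (candsOf rules)) ((pre ++ f : VS), [])).2).Nodup := by
      rw [← hded, PySem.List.dedup_eq_ofList]
      exact PySem.Set.nodup_ofList _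
    simp only [bLoop]
    rw [hstep, hded]
    by_cases hD : (addNew (f.flatMap (candsOf rules)) ((pre ++ f : VS), [])).2 = []
    · rw [hD, List.append_nil, if_pos rfl]
      cases f with
      | nil =>
        cases n <;> simp [bLevels]
      | cons c f' =>
        simp only [bLevels]
        rw [level_fold rules (c :: f') (pre ++ c :: f') [] []]
        simp only [List.nil_append, hD]
        cases n <;> simp [bLevels]
    · rw [if_neg (by
        intro hlen
        rw [List.length_append] at hlen
        have := List.length_pos_of_ne_nil hD
        omega)]
      have hcl : ∀ w ∈ pre ++ f, ∀ c ∈ candsOf rules w,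
          c ∈ (pre ++ f) ++ (addNew (f.flatMap (candsOf rules)) ((pre ++ f : VS), [])).2 := by
        intro w hw c hc
        rw [hmem c]
        rcases List.mem_append.mp hw with hwp | hwf
        · exact List.mem_append.mpr (Or.inl (h2 w hwp c hc))
        · exact List.mem_append.mpr (Or.inr (List.mem_flatMap.mpr ⟨w, hw, hc⟩))
      have := ih (pre ++ f) ((addNew (f.flatMap (candsOf rules)) ((pre ++ f : VS), [])).2)
        hnodup hcl
      rw [this]
      cases f with
      | nil =>
        exfalso
        apply hD
        simp [addNew]
      | cons c f' =>
        have hlev : bLevels rules (n + 1) (c :: f') (pre ++ c :: f') []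
            = (addNew ((c :: f').flatMap (candsOf rules)) ((pre ++ c :: f' : VS), [])).2 ++
              bLevels rules n
                (addNew ((c :: f').flatMap (candsOf rules)) ((pre ++ c :: f' : VS), [])).2
                ((pre ++ c :: f') ++
                  (addNew ((c :: f').flatMap (candsOf rules)) ((pre ++ c :: f' : VS), [])).2)
                [] := by
          simp only [bLevels]
          rw [level_fold rules (c :: f') (pre ++ c :: f') [] []]
          simp only [List.nil_append]
          rw [addNew_split ((c :: f').flatMap (candsOf rules)) (pre ++ c :: f') []]
          exact bLevels_acc rules n _ _ _
        rw [hlev]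
        simp

-- ===== VERDICT (by name: the statement is the Claim_ definition above) =====
theorem generate_substitution_variants_spec : Claim_equal_generate_substitution_variants := by
  intro word rules max_subs _
  unfold Spec_generate_substitution_variants
  unfold generate_substitution_variants generate_substitution_variants_alt
  by_cases hms : max_subs ≤ 0
  · rw [show max_subs.toNat = 0 from Int.toNat_of_nonpos hms]
    rw [aLoop]
    rw [if_pos hms]
    rw [aLoop]
    simp [bLoop, PySem.List.slice_from_one]
  · have hn : 1 ≤ max_subs.toNat := by omega
    set rl := rules.map (fun r => (r.1.toList, r.2.toList)) with hrl
    have hv0 : (PySem.Set.add PySem.Set.empty word.toList : VS) = [word.toList] := rfl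
    have hb := bLoop_eq_bLevels rl max_subs.toNat [] [word.toList] (by simp) (by simp)
    simp only [List.nil_append] at hb
    rw [hb, PySem.List.slice_from_one]
    rw [show ([word.toList] ++
        bLevels rl max_subs.toNat [word.toList] [word.toList] []).tail
      = bLevels rl max_subs.toNat [word.toList] [word.toList] [] from rfl]
    have hd : (0 : Int) + max_subs.toNat = max_subs := by omega
    have h := aLoop_eq_bAux rl max_subs max_subs.toNat hn 0 hd [word.toList] [] [word.toList] []
    simp only [List.map_cons, List.map_nil, List.append_nil] at h
    rw [hv0, h, ← bLevels_eq_bAux rl max_subs.toNat hn]
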